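-- pv_equiv track=rewrite | github.com/vonHacht/various-python | mathematics/circle.py | lattice_points_within_circle
-- ===== SOURCE A (Python) =====
-- def lattice_points_within_circle(radius):
--     count = 0
--     m = -radius
--     while m <= radius:
--         n = -radius
--         while n <= radius:
--             if pow(m, 2) + pow(n, 2) <= pow(radius, 2):
--                 count = count + 1
--             n += 1
--         m += 1
--     return count
-- ===== SOURCE B (Python) =====
-- def lattice_points_within_circle(radius):
--     # O(radius) boundary walk: row m contributes 2*floor(sqrt(r^2-m^2))+1 points;
--     # the row half-width n only decreases as m grows, so walk it down once.
--     if radius < 0: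
--         return 0
--     r2 = radius * radius
--     total = 2 * radius + 1          # the m = 0 row
--     n = radius
--     for m in range(1, radius + 1):  # rows m and -m together
--         while n * n > r2 - m * m:
--             n -= 1
--         total += 2 * (2 * n + 1)
--     return total
-- ===== Notes on version B (the rewrite author's own statement) =====
-- stated objective: faster
-- what changed: Replaced the O(r^2) scan of every lattice point in the bounding square by an O(r) boundary walk: the half-width of each row is computed by monotonically decrementing a single pointer, and symmetric rows m and -m are counted together.
import Mathlib
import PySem

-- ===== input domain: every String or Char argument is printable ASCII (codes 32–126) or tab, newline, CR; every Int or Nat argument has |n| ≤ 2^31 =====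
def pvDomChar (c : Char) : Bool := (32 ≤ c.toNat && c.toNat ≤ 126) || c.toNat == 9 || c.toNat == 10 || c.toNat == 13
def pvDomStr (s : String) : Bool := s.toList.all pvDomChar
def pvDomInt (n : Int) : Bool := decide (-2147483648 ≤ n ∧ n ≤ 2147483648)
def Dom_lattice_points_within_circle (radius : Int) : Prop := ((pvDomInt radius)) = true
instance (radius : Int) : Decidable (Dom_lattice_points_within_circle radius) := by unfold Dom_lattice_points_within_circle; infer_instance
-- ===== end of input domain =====

-- B replaces A's O(radius^2) scan of the bounding square by an O(radius) boundary walk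
-- (one monotonically decreasing row half-width pointer, symmetric rows counted together).

-- ===== PORT A =====
-- the two counting while-loops become folds over the same integer range -radius..radius
def lattice_points_within_circle (radius : Int) : Int :=
  (PySem.List.pyRange (-radius) (radius + 1) 1).foldl
    (fun count m =>
      (PySem.List.pyRange (-radius) (radius + 1) 1).foldl
        (fun c n => if m * m + n * n ≤ radius * radius then c + 1 else c) count)
    0

-- ===== PORT B =====
-- 'while n * n > k: n -= 1'; the '0 < n' conjunct only makes the recursion total:
-- at every call site 0 ≤ k, so for n = 0 the Python guard '0 > k' is false as well.
def pvWalkDown (k n : Int) : Int :=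
  if h : 0 < n ∧ k < n * n then pvWalkDown k (n - 1) else n
termination_by n.toNat
decreasing_by obtain ⟨h1, -⟩ := h; omega

-- one iteration of B's for-loop body: walk n down, add the two rows m and -m
def pvStep (r2 : Int) (st : Int × Int) (m : Int) : Int × Int :=
  let n := pvWalkDown (r2 - m * m) st.2
  (st.1 + 2 * (2 * n + 1), n)

def lattice_points_within_circle_alt (radius : Int) : Int :=
  if radius < 0 then 0
  else
    ((PySem.List.pyRange 1 (radius + 1) 1).foldl (pvStep (radius * radius))
      (2 * radius + 1, radius)).1

-- ===== PRECONDITION & SPEC =====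
def Spec_lattice_points_within_circle (radius : Int) (out : Int) : Prop := out = lattice_points_within_circle_alt radius
instance (radius : Int) (out : Int) : Decidable (Spec_lattice_points_within_circle radius out) := by unfold Spec_lattice_points_within_circle; infer_instance

-- ===== CLAIM (what is proved, stated in full; the proofs are below) =====
def Claim_equal_lattice_points_within_circle : Prop := ∀ (radius : Int), Dom_lattice_points_within_circle radius → Spec_lattice_points_within_circle radius (lattice_points_within_circle radius)

-- ===== LEMMAS AND PROOFS =====

-- integer square root (of the nonnegative part), the value B's walk-down loop computes
def pvIsq (k : Int) : Int := (Nat.sqrt k.toNat : Int)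

theorem pvIsq_nonneg (k : Int) : 0 ≤ pvIsq k := Int.natCast_nonneg _

theorem le_pvIsq {k n : Int} (hk : 0 ≤ k) (hn : 0 ≤ n) : n ≤ pvIsq k ↔ n * n ≤ k := by
  lift n to ℕ using hn
  lift k to ℕ using hk
  unfold pvIsq
  rw [Int.toNat_natCast]
  exact_mod_cast Nat.le_sqrt

theorem pvIsq_sq {r : Int} (hr : 0 ≤ r) : pvIsq (r * r) = r := by
  lift r to ℕ using hr
  unfold pvIsq
  rw [← Nat.cast_mul, Int.toNat_natCast, Nat.sqrt_eq]

theorem pvIsq_mono {a b : Int} (h : a ≤ b) : pvIsq a ≤ pvIsq b := by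
  unfold pvIsq
  exact_mod_cast Nat.sqrt_le_sqrt (Int.toNat_le_toNat h)

theorem pvWalkDown_eq (k : Int) (hk : 0 ≤ k) :
    ∀ (t : Nat) (n : Int), n.toNat ≤ t → pvIsq k ≤ n → pvWalkDown k n = pvIsq k := by
  intro t
  induction t with
  | zero =>
    intro n h0 hn
    have hnn : ¬ (0 < n ∧ k < n * n) := by
      rintro ⟨h1, -⟩; omega
    rw [pvWalkDown, dif_neg hnn]
    have := pvIsq_nonneg k
    omega
  | succ t ih =>
    intro n hnt hn
    rw [pvWalkDown]
    split_ifs with h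
    · apply ih (n - 1) (by omega)
      by_contra hc
      have h1 : n ≤ pvIsq k := by omega
      have h2 : n * n ≤ k := (le_pvIsq hk h.1.le).1 h1
      exact absurd h2 (not_le.2 h.2)
    · have h0 := pvIsq_nonneg k
      by_cases hpos : 0 < n
      · have hnn : n * n ≤ k := not_lt.1 (fun hlt => h ⟨hpos, hlt⟩)
        have := (le_pvIsq hk hpos.le).2 hnn
        omega
      · omega

-- x² ≤ k exactly on the band |x| ≤ ⌊√k⌋
theorem sq_le_iff_band (k x : Int) (hk : 0 ≤ k) :
    x * x ≤ k ↔ -(pvIsq k) ≤ x ∧ x ≤ pvIsq k := by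
  have h0 := pvIsq_nonneg k
  constructor
  · intro hx
    rcases le_or_gt 0 x with hx0 | hx0
    · have := (le_pvIsq hk hx0).2 hx
      omega
    · have hnx : (0:Int) ≤ -x := by omega
      have := (le_pvIsq hk hnx).2 (by nlinarith)
      omega
  · rintro ⟨h1, h2⟩
    rcases le_or_gt 0 x with hx0 | hx0
    · exact (le_pvIsq hk hx0).1 h2
    · have hnx : (0:Int) ≤ -x := by omega
      have := (le_pvIsq hk hnx).1 (by omega)
      nlinarith

-- how many integers of [a, b) lie in the band [lo, hi]
theorem countP_band (p : Int → Bool) (lo hi : Int)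
    (hp : ∀ x, p x = true ↔ lo ≤ x ∧ x ≤ hi) :
    ∀ (t : Nat) (a b : Int), (b - a).toNat ≤ t →
      (((PySem.List.pyRange a b 1).countP p : Nat) : Int)
        = max 0 (min b (hi + 1) - max a lo) := by
  intro t
  induction t with
  | zero =>
    intro a b h
    rw [PySem.List.pyRange_one_eq_nil (by omega)]
    simp
    omega
  | succ t ih =>
    intro a b h
    by_cases hab : a < b
    · rw [PySem.List.pyRange_one_cons hab, List.countP_cons]
      by_cases hpa : lo ≤ a ∧ a ≤ hi
      · rw [if_pos ((hp a).2 hpa)]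
        push_cast
        rw [ih (a + 1) b (by omega)]
        omega
      · rw [if_neg (by simp [hp a, hpa]), Nat.add_zero, ih (a + 1) b (by omega)]
        omega
    · rw [PySem.List.pyRange_one_eq_nil (by omega)]
      simp
      omega

-- A's inner while loop adds exactly the width of row m
theorem row_count (r m c : Int) (hr : 0 ≤ r) (hm1 : -r ≤ m) (hm2 : m ≤ r) :
    (PySem.List.pyRange (-r) (r + 1) 1).foldl
      (fun c n => if m * m + n * n ≤ r * r then c + 1 else c) c
      = c + (2 * pvIsq (r * r - m * m) + 1) := by
  have hk : 0 ≤ r * r - m * m := by nlinarith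
  have hs0 := pvIsq_nonneg (r * r - m * m)
  have hsr : pvIsq (r * r - m * m) ≤ r := by
    have := pvIsq_mono (show r * r - m * m ≤ r * r by nlinarith)
    rwa [pvIsq_sq hr] at this
  have hp : ∀ x : Int, (decide (m * m + x * x ≤ r * r)) = true ↔
      -(pvIsq (r * r - m * m)) ≤ x ∧ x ≤ pvIsq (r * r - m * m) := by
    intro x
    rw [decide_eq_true_iff]
    constructor
    · intro hx
      exact (sq_le_iff_band _ x hk).1 (by linarith)
    · intro hx
      have := (sq_le_iff_band _ x hk).2 hx
      linarith
  rw [PySem.List.foldl_ite_add_one]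
  rw [countP_band _ (-(pvIsq (r * r - m * m))) (pvIsq (r * r - m * m)) hp
      ((r + 1) - (-r)).toNat (-r) (r + 1) le_rfl]
  omega

-- A = the sum of the row widths over m ∈ [-r, r]
theorem A_eq_sum (r : Int) (hr : 0 ≤ r) :
    lattice_points_within_circle r
      = ((PySem.List.pyRange (-r) (r + 1) 1).map
          (fun m => 2 * pvIsq (r * r - m * m) + 1)).sum := by
  unfold lattice_points_within_circle
  rw [PySem.List.foldl_congr_mem _ _
      (fun count m => count + (2 * pvIsq (r * r - m * m) + 1)) 0
      (by
        intro acc m hmem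
        rw [PySem.List.mem_pyRange_one] at hmem
        exact row_count r m acc hr (by omega) (by omega))]
  rw [PySem.List.foldl_add]
  ring

-- invariant of B's for-loop: the pointer is the current row's half-width
theorem B_loop (r : Int) (hr : 0 ≤ r) :
    ∀ (t : Nat) (j T : Int), 0 ≤ j → j ≤ r → (r - j).toNat ≤ t →
      ((PySem.List.pyRange (j + 1) (r + 1) 1).foldl (pvStep (r * r))
          (T, pvIsq (r * r - j * j))).1
        = T + ((PySem.List.pyRange (j + 1) (r + 1) 1).map
            (fun m => 2 * (2 * pvIsq (r * r - m * m) + 1))).sum := by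
  intro t
  induction t with
  | zero =>
    intro j T h0 hjr ht
    have : j = r := by omega
    subst this
    rw [PySem.List.pyRange_one_eq_nil (by omega)]
    simp
  | succ t ih =>
    intro j T h0 hjr ht
    by_cases hjr' : j = r
    · subst hjr'
      rw [PySem.List.pyRange_one_eq_nil (by omega)]
      simp
    · have hjlt : j < r := by omega
      rw [PySem.List.pyRange_one_cons (by omega)]
      have hk : 0 ≤ r * r - (j + 1) * (j + 1) := by nlinarith
      have hmono : pvIsq (r * r - (j + 1) * (j + 1)) ≤ pvIsq (r * r - j * j) :=
        pvIsq_mono (by nlinarith)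
      have hwd : pvWalkDown (r * r - (j + 1) * (j + 1)) (pvIsq (r * r - j * j))
          = pvIsq (r * r - (j + 1) * (j + 1)) :=
        pvWalkDown_eq _ hk (pvIsq (r * r - j * j)).toNat _ le_rfl hmono
      have hstep : pvStep (r * r) (T, pvIsq (r * r - j * j)) (j + 1)
          = (T + 2 * (2 * pvIsq (r * r - (j + 1) * (j + 1)) + 1),
             pvIsq (r * r - (j + 1) * (j + 1))) := by
        simp [pvStep, hwd]
      rw [List.foldl_cons, hstep,
        ih (j + 1) (T + 2 * (2 * pvIsq (r * r - (j + 1) * (j + 1)) + 1))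
          (by omega) (by omega) (by omega)]
      simp [List.sum_cons]
      ring
  
-- the negative half of the range sums like the positive half (the summand is even in m)
theorem sum_neg_half (f : Int → Int) (hf : ∀ x, f (-x) = f x) :
    ∀ (t : Nat) (r : Int), 0 ≤ r → r.toNat ≤ t →
      ((PySem.List.pyRange (-r) 0 1).map f).sum
        = ((PySem.List.pyRange 1 (r + 1) 1).map f).sum := by
  intro t
  induction t with
  | zero =>
    intro r h0 ht
    have : r = 0 := by omega
    subst this
    rw [PySem.List.pyRange_one_eq_nil (by omega), PySem.List.pyRange_one_eq_nil (by omega)]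
  | succ t ih =>
    intro r h0 ht
    by_cases hr0 : r = 0
    · subst hr0
      rw [PySem.List.pyRange_one_eq_nil (by omega), PySem.List.pyRange_one_eq_nil (by omega)]
    · have hrpos : 0 < r := by omega
      rw [PySem.List.pyRange_one_cons (by omega),
        PySem.List.pyRange_one_succ_right (by omega)]
      have h := ih (r - 1) (by omega) (by omega)
      rw [show (r - 1 : Int) + 1 = r from by ring] at h
      simp only [List.map_cons, List.sum_cons, List.map_append, List.sum_append,
        List.map_nil, List.sum_nil]
      rw [show (-r : Int) + 1 = -(r - 1) from by ring, h, hf r]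
      omega

-- ===== VERDICT (by name: the statement is the Claim_ definition above) =====
theorem lattice_points_within_circle_spec : Claim_equal_lattice_points_within_circle := by
  intro radius _
  unfold Spec_lattice_points_within_circle
  by_cases hr : radius < 0
  · unfold lattice_points_within_circle lattice_points_within_circle_alt
    rw [if_pos hr, PySem.List.pyRange_one_eq_nil (by omega)]
    rfl
  · rw [not_lt] at hr
    set r := radius
    set f : Int → Int := fun m => 2 * pvIsq (r * r - m * m) + 1 with hfdef
    have hA : lattice_points_within_circle r
        = ((PySem.List.pyRange (-r) (r + 1) 1).map f).sum := A_eq_sum r hr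
    -- split the range at 0 and peel m = 0
    have hsplit : PySem.List.pyRange (-r) (r + 1) 1
        = PySem.List.pyRange (-r) 0 1 ++ PySem.List.pyRange 0 (r + 1) 1 :=
      PySem.List.pyRange_one_append _ _ _ (by omega) (by omega)
    have hcons : PySem.List.pyRange 0 (r + 1) 1 = 0 :: PySem.List.pyRange 1 (r + 1) 1 :=
      PySem.List.pyRange_one_cons (by omega)
    have hneg : ((PySem.List.pyRange (-r) 0 1).map f).sum
        = ((PySem.List.pyRange 1 (r + 1) 1).map f).sum :=
      sum_neg_half f (fun x => by rw [hfdef]; simp only []; rw [neg_mul_neg]) r.toNat r hr le_rfl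
    have hf0 : f 0 = 2 * r + 1 := by simp [hfdef, pvIsq_sq hr]
    -- B's value
    have hB : lattice_points_within_circle_alt r
        = (2 * r + 1) + ((PySem.List.pyRange 1 (r + 1) 1).map (fun m => 2 * f m)).sum := by
      unfold lattice_points_within_circle_alt
      rw [if_neg (not_lt.2 hr)]
      have h0 := B_loop r hr r.toNat 0 (2 * r + 1) le_rfl hr (by omega)
      rw [show (0 : Int) + 1 = 1 from by ring,
        show r * r - 0 * 0 = r * r from by ring, pvIsq_sq hr] at h0
      rw [h0]
    have hdouble : ((PySem.List.pyRange 1 (r + 1) 1).map (fun m => 2 * f m)).sum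
        = 2 * ((PySem.List.pyRange 1 (r + 1) 1).map f).sum :=
      List.sum_map_mul_left _ f 2
    rw [hA, hB, hsplit, List.map_append, List.sum_append, hcons, List.map_cons,
      List.sum_cons, hneg, hf0, hdouble]
    ring
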